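-- pv_equiv track=rewrite | github.com/id-b3/AirFlow-ImaLife | phantom_trainer/phantoptimize/common/functionutil_aar.py | rearrange_data_as_images_from_list
-- ===== SOURCE A (Python) =====
-- from collections import OrderedDict
--
-- def rearrange_data_as_images_from_list(indict_data, inlist_images):
--     list_images_alldata = list(indict_data.values())[0]
--     indexes_data_this_images = [i for i, it_image in enumerate(list_images_alldata) if it_image in inlist_images]
--
--     outdict_data_this_images = OrderedDict()
--     for name_field, data_field in indict_data.items():
--         data_field_this_images = [data_field[index] for index in indexes_data_this_images]
--         outdict_data_this_images[name_field] = data_field_this_images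
--     # endfor
--
--     return outdict_data_this_images
-- ===== SOURCE B (Python) =====
-- from collections import OrderedDict
--
-- def rearrange_data_as_images_from_list(indict_data, inlist_images):
--     list_images_alldata = list(indict_data.values())[0]
--     fields = list(indict_data.items())
--     cols = [[] for _ in fields]
--     for i, it_image in enumerate(list_images_alldata):
--         if it_image in inlist_images:
--             for col, (_, data_field) in zip(cols, fields):
--                 col.append(data_field[i])
--     return OrderedDict((name, col) for (name, _), col in zip(fields, cols))
-- ===== Notes on version B (the rewrite author's own statement) =====
-- stated objective: alternative
-- what changed: B transposes the loop nesting: instead of precomputing a matching-index list and re-scanning it once per field, it makes a single pass over the enumerated rows, appending each matching row's value to aligned per-field column buffers built with zip (no index list, no dict lookups).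
import Mathlib
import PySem

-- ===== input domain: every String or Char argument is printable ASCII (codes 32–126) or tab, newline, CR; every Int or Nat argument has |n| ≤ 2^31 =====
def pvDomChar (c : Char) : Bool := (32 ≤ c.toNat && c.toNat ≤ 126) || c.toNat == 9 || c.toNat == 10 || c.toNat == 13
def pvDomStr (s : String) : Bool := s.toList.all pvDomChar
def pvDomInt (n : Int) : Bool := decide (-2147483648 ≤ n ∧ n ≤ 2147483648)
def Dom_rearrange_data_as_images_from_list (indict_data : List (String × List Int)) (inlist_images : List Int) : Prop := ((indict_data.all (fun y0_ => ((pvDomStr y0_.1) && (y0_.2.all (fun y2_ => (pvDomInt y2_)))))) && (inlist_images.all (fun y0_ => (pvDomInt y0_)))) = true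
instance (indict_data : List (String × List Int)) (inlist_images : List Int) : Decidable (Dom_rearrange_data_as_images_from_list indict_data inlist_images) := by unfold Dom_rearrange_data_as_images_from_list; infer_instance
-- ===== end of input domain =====

-- ===== PORT A =====
-- B filters once over the rows (transposed loops, aligned column buffers) instead of
-- precomputing an index list and re-scanning it per field; objective: alternative decomposition.
def rearrange_data_as_images_from_list (indict_data : List (String × List Int)) (inlist_images : List Int) : List (String × List Int) :=
  -- list(indict_data.values())[0]  (empty dict raises IndexError: excluded by Pre_; headD is never
  -- reached with the default there inside Pre_)
  let list_images_alldata := (indict_data.map Prod.snd).headD []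
  -- [i for i, it_image in enumerate(list_images_alldata) if it_image in inlist_images]
  let indexes_data_this_images :=
    (PySem.List.enumerate list_images_alldata 0).filterMap
      (fun p => if p.2 ∈ inlist_images then some p.1 else none)
  -- for name_field, data_field in indict_data.items(): out[name] = [data_field[index] for index in indexes]
  -- data_field[index] raises IndexError when out of range: excluded by Pre_, so .getD 0 is exact there
  indict_data.map (fun q =>
    (q.1, indexes_data_this_images.map (fun i => (PySem.List.pyGet? q.2 i).getD 0)))

-- ===== PORT B =====
def rearrange_data_as_images_from_list_alt (indict_data : List (String × List Int)) (inlist_images : List Int) : List (String × List Int) :=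
  -- list(indict_data.values())[0]  (same IndexError remark as in port A)
  let list_images_alldata := (indict_data.map Prod.snd).headD []
  -- single pass over enumerate(rows); on a match append data_field[i] to each aligned column buffer
  let cols :=
    (PySem.List.enumerate list_images_alldata 0).foldl
      (fun cols p =>
        if p.2 ∈ inlist_images then
          (cols.zip indict_data).map (fun c => c.1 ++ [(PySem.List.pyGet? c.2.2 p.1).getD 0])
        else cols)
      (indict_data.map (fun _ => ([] : List Int)))
  -- OrderedDict((name, col) for (name, _), col in zip(fields, cols))
  (indict_data.zip cols).map (fun c => (c.1.1, c.2))

-- ===== PRECONDITION & SPEC =====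
-- Pre_ excludes exactly the inputs where Python A raises IndexError (empty dict, or a matching
-- row index out of range for some field); key-nodup is free since a Python dict cannot carry
-- duplicate keys (an association list with duplicates represents no dict input).
def Pre_rearrange_data_as_images_from_list (indict_data : List (String × List Int)) (inlist_images : List Int) : Prop :=
  indict_data ≠ [] ∧ (indict_data.map Prod.fst).Nodup ∧
    ∀ q ∈ indict_data, ∀ k : Nat, k < ((indict_data.map Prod.snd).headD []).length →
      ((indict_data.map Prod.snd).headD []).getD k 0 ∈ inlist_images → k < q.2.length
instance (indict_data : List (String × List Int)) (inlist_images : List Int) : Decidable (Pre_rearrange_data_as_images_from_list indict_data inlist_images) := by unfold Pre_rearrange_data_as_images_from_list; infer_instance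

def pvWitness_rearrange_data_as_images_from_list : (List (String × List Int)) × List Int :=
  ([("a", [1, 2, 3]), ("b", [10, 20, 30])], [2, 3])


def Spec_rearrange_data_as_images_from_list (indict_data : List (String × List Int)) (inlist_images : List Int) (out : List (String × List Int)) : Prop := out = rearrange_data_as_images_from_list_alt indict_data inlist_images
instance (indict_data : List (String × List Int)) (inlist_images : List Int) (out : List (String × List Int)) : Decidable (Spec_rearrange_data_as_images_from_list indict_data inlist_images out) := by unfold Spec_rearrange_data_as_images_from_list; infer_instance

-- ===== CLAIM (what is proved, stated in full; the proofs are below) =====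
def Claim_equal_rearrange_data_as_images_from_list : Prop := ∀ (indict_data : List (String × List Int)) (inlist_images : List Int), Dom_rearrange_data_as_images_from_list indict_data inlist_images → Pre_rearrange_data_as_images_from_list indict_data inlist_images → Spec_rearrange_data_as_images_from_list indict_data inlist_images (rearrange_data_as_images_from_list indict_data inlist_images)

-- ===== LEMMAS AND PROOFS =====


theorem pv_zip_map_self {α β : Type} (d : List α) (h : α → β) :
    (d.map h).zip d = d.map (fun q => (h q, q)) := by
  induction d with
  | nil => rfl
  | cons a t ih => simp [ih]

theorem pv_zip_map_self' {α β : Type} (d : List α) (g : α → β) :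
    d.zip (d.map g) = d.map (fun q => (q, g q)) := by
  induction d with
  | nil => rfl
  | cons a t ih => simp [ih]

theorem pv_fold_inv (indict_data : List (String × List Int)) (inlist_images : List Int)
    (E : List (Int × Int)) (h : String × List Int → List Int) :
    E.foldl
      (fun cols p =>
        if p.2 ∈ inlist_images then
          (cols.zip indict_data).map (fun c => c.1 ++ [(PySem.List.pyGet? c.2.2 p.1).getD 0])
        else cols)
      (indict_data.map h)
    = indict_data.map (fun q =>
        h q ++ (E.filterMap (fun p => if p.2 ∈ inlist_images then some p.1 else none)).map
          (fun i => (PySem.List.pyGet? q.2 i).getD 0)) := by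
  induction E generalizing h with
  | nil => simp
  | cons p E ih =>
    by_cases hp : p.2 ∈ inlist_images
    · simp only [List.foldl_cons, if_pos hp, pv_zip_map_self, List.map_map, Function.comp_def]
      rw [ih (fun q => h q ++ [(PySem.List.pyGet? q.2 p.1).getD 0])]
      simp [hp]
    · simp only [List.foldl_cons, List.filterMap_cons, hp, ite_false]
      exact ih h

-- ===== VERDICT (by name: the statement is the Claim_ definition above) =====
theorem rearrange_data_as_images_from_list_spec : Claim_equal_rearrange_data_as_images_from_list := by
  intro d imgs _ _
  unfold Spec_rearrange_data_as_images_from_list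
  unfold rearrange_data_as_images_from_list rearrange_data_as_images_from_list_alt
  dsimp only
  rw [pv_fold_inv d imgs _ (fun _ => ([] : List Int)), pv_zip_map_self']
  simp
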